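-- pv_equiv track=rewrite | github.com/MikeBendorf11/Python-Algorithms | divideConquer.py | countInst
-- ===== SOURCE A (Python) =====
-- import math
--
-- def countInst(arr, lft, rgt, val):
--   if lft==rgt:
--     if arr[lft] == val:
--       return 1
--     else:
--       return 0
--   else:
--     lCount = countInst(arr, lft, math.floor((lft+rgt)/2), val)
--     rCount = countInst(arr, math.floor((lft+rgt)/2)+1, rgt, val)
--     return lCount + rCount
-- ===== SOURCE B (Python) =====
-- def countInst(arr, lft, rgt, val):
--   count = 0
--   i = lft
--   while True:
--     count += arr[i] == val
--     if i == rgt: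
--       return count
--     i += 1
-- ===== Notes on version B (the rewrite author's own statement) =====
-- stated objective: simpler
-- what changed: Replaced the binary divide-and-conquer recursion over the index interval with a single iterative scan from lft to rgt that accumulates one running counter; no recursion, no midpoint arithmetic, no per-element function-call overhead.
import Mathlib
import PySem

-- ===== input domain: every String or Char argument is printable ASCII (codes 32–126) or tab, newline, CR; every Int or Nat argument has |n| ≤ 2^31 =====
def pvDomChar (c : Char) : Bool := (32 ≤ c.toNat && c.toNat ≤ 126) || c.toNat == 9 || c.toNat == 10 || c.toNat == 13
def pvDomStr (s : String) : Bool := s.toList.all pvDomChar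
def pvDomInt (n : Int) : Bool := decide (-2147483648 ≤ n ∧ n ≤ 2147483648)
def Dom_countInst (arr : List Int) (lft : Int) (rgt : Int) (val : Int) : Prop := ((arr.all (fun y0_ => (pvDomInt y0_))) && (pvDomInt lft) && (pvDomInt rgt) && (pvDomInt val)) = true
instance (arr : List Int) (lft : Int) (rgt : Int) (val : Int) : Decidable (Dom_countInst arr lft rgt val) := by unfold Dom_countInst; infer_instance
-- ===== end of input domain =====

-- B replaces A's binary divide-and-conquer recursion by a single iterative counting scan; objective: simpler.

-- ===== PORT A =====
-- A's recursion has no base case for lft > rgt (it diverges there); the fuel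
-- only makes the same computation total — Pre_ guarantees it is never exhausted.
def countInstFuel (fuel : Nat) (arr : List Int) (lft : Int) (rgt : Int) (val : Int) : Int :=
  match fuel with
  | 0 => 0
  | fuel + 1 =>
    if lft = rgt then
      match PySem.List.pyGet? arr lft with   -- arr[lft]; none = IndexError, excluded by Pre_
      | some x => if x = val then 1 else 0
      | none => 0
    else
      let mid := PySem.Int.floordiv (lft + rgt) 2   -- math.floor((lft+rgt)/2)
      countInstFuel fuel arr lft mid val + countInstFuel fuel arr (mid + 1) rgt val

def countInst (arr : List Int) (lft : Int) (rgt : Int) (val : Int) : Int :=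
  countInstFuel ((rgt - lft).toNat + 1) arr lft rgt val

-- ===== PORT B =====
-- B's 'while True' scan: count += (arr[i] == val); stop after i == rgt.
-- arr[i] → pyGet?; a 'none' is Python's IndexError (the scan stops, outside Pre_),
-- so each iteration has a valid index and the loop terminates because i grows
-- toward arr.length — well-founded recursion on the remaining distance, no fuel.
def countInstAltGo (arr : List Int) (rgt : Int) (val : Int) (i : Int) (count : Int) : Int :=
  match hg : PySem.List.pyGet? arr i with
  | none => count                                        -- Python B raises IndexError here
  | some x =>
    let count' := count + (if x = val then 1 else 0)     -- count += (arr[i] == val)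
    if i = rgt then count' else countInstAltGo arr rgt val (i + 1) count'
termination_by ((arr.length : Int) - i).toNat
decreasing_by
  have hin : PySem.Raise.InRange arr.length i := by
    by_contra hc
    rw [← PySem.List.pyGet?_eq_none_iff] at hc
    simp [hc] at hg
  simp [PySem.Raise.InRange] at hin
  omega

def countInst_alt (arr : List Int) (lft : Int) (rgt : Int) (val : Int) : Int :=
  countInstAltGo arr rgt val lft 0

-- ===== PRECONDITION & SPEC =====
-- Pre_ is exactly where Python A returns: lft ≤ rgt (else infinite recursion →
-- RecursionError) and every visited index lft..rgt valid (else IndexError;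
-- negative indices down to -len(arr) are valid Python indexing and are admitted).
def Pre_countInst (arr : List Int) (lft : Int) (rgt : Int) (val : Int) : Prop :=
  lft ≤ rgt ∧ -(arr.length : Int) ≤ lft ∧ rgt < (arr.length : Int)
instance (arr : List Int) (lft : Int) (rgt : Int) (val : Int) : Decidable (Pre_countInst arr lft rgt val) := by unfold Pre_countInst; infer_instance
def pvWitness_countInst : List Int × Int × Int × Int := ([1, 2, 1], 0, 2, 1)

def Spec_countInst (arr : List Int) (lft : Int) (rgt : Int) (val : Int) (out : Int) : Prop := out = countInst_alt arr lft rgt val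
instance (arr : List Int) (lft : Int) (rgt : Int) (val : Int) (out : Int) : Decidable (Spec_countInst arr lft rgt val out) := by unfold Spec_countInst; infer_instance

-- ===== CLAIM (what is proved, stated in full; the proofs are below) =====
def Claim_equal_countInst : Prop := ∀ (arr : List Int) (lft : Int) (rgt : Int) (val : Int), Dom_countInst arr lft rgt val → Pre_countInst arr lft rgt val → Spec_countInst arr lft rgt val (countInst arr lft rgt val)

-- ===== LEMMAS AND PROOFS =====

-- Both ports are related to one mathematical value: the number of indices
-- i ∈ [lft, rgt] with arr[i] = val (counted over the Python index range).
def rangeCount (arr : List Int) (lft rgt val : Int) : Int :=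
  ((PySem.List.pyRange lft (rgt + 1) 1).countP
    (fun i => PySem.List.pyGet? arr i = some val) : Int)

lemma rangeCount_split (arr : List Int) (lft mid rgt val : Int) (h1 : lft ≤ mid) (h2 : mid ≤ rgt) :
    rangeCount arr lft rgt val
      = rangeCount arr lft mid val + rangeCount arr (mid + 1) rgt val := by
  unfold rangeCount
  rw [PySem.List.pyRange_one_append lft (mid + 1) (rgt + 1) (by omega) (by omega),
      List.countP_append]
  push_cast
  ring

lemma rangeCount_singleton (arr : List Int) (lft val : Int) :
    rangeCount arr lft lft val
      = match PySem.List.pyGet? arr lft with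
        | some x => if x = val then 1 else 0
        | none => 0 := by
  unfold rangeCount
  rw [PySem.List.pyRange_one_singleton]
  rcases h : PySem.List.pyGet? arr lft with _ | x
  · simp [h]
  · by_cases hx : x = val <;> simp [h, hx]

-- A's recursion computes rangeCount whenever lft ≤ rgt and the fuel suffices.
lemma fuel_eq (fuel : Nat) : ∀ (arr : List Int) (lft rgt val : Int), lft ≤ rgt →
    (rgt - lft).toNat < fuel →
    countInstFuel fuel arr lft rgt val = rangeCount arr lft rgt val := by
  induction fuel with
  | zero => intro _ _ _ _ _ h; omega
  | succ f ih =>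
    intro arr lft rgt val hle hfuel
    by_cases heq : lft = rgt
    · subst heq
      simp only [countInstFuel]
      exact (rangeCount_singleton arr lft val).symm
    · have hlt : lft < rgt := lt_of_le_of_ne hle heq
      have hmid := PySem.Int.floordiv_two_mid_bounds (lo := lft) (hi := rgt) hle
      set mid := PySem.Int.floordiv (lft + rgt) 2 with hm
      have hmlt : mid < rgt := by
        rw [hm, PySem.Int.floordiv_lt_iff_lt_mul (by omega)]; omega
      simp only [countInstFuel, if_neg heq]
      rw [ih arr lft mid val (by omega) (by omega),
          ih arr (mid + 1) rgt val (by omega) (by omega)]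
      exact (rangeCount_split arr lft mid rgt val (by omega) (by omega)).symm

-- B's scan accumulates rangeCount when every index i..rgt is valid.
lemma altGo_eq (arr : List Int) (rgt val : Int) (n : Nat) : ∀ (i count : Int),
    (rgt - i).toNat ≤ n → i ≤ rgt → -(arr.length : Int) ≤ i → rgt < (arr.length : Int) →
    countInstAltGo arr rgt val i count = count + rangeCount arr i rgt val := by
  induction n with
  | zero =>
    intro i count h0 hle hlo hhi
    have hieq : i = rgt := by omega
    rw [countInstAltGo]
    split
    · next hnone =>
      rw [PySem.List.pyGet?_eq_none_iff] at hnone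
      exact absurd (by simp [PySem.Raise.InRange]; omega) hnone
    · next x hsome =>
      subst hieq
      rw [if_pos rfl, rangeCount_singleton arr i val, hsome]
  | succ f ih =>
    intro i count h0 hle hlo hhi
    rw [countInstAltGo]
    split
    · next hnone =>
      rw [PySem.List.pyGet?_eq_none_iff] at hnone
      exact absurd (by simp [PySem.Raise.InRange]; omega) hnone
    · next x hsome =>
      by_cases hieq : i = rgt
      · subst hieq
        rw [if_pos rfl, rangeCount_singleton arr i val, hsome]
      · have hlt : i < rgt := lt_of_le_of_ne hle hieq
        rw [if_neg hieq,
            ih (i + 1) _ (by omega) (by omega) (by omega) hhi,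
            rangeCount_split arr i i rgt val le_rfl (by omega),
            rangeCount_singleton arr i val, hsome]
        by_cases hx : x = val
        · simp [hx]; ring
        · simp [hx]

-- ===== VERDICT (by name: the statement is the Claim_ definition above) =====
theorem countInst_spec : Claim_equal_countInst := by
  intro arr lft rgt val _ hpre
  obtain ⟨h1, h2, h3⟩ := hpre
  unfold Spec_countInst countInst countInst_alt
  rw [fuel_eq _ arr lft rgt val h1 (by omega),
      altGo_eq arr rgt val ((rgt - lft).toNat) lft 0 (by omega) h1 h2 h3]
  ring
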